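-- pv_equiv track=rewrite | github.com/pypi-data/pypi-mirror-89 | packages/pixel-classifier-torch/pixel_classifier_torch-0.2-py3-none-any.whl/segmentation/postprocessing/util.py | baseline_to_bbox
-- ===== SOURCE A (Python) =====
-- def baseline_to_bbox(baseline, margin_top=12, margin_bot=10, margin_left=10, margin_right=10):
--     bounding_box = []
--     for ind, point in enumerate(baseline):
--         x, y = point
--         if ind == 0:
--             x = x - margin_left
--         if ind == len(baseline) - 1:
--             x = x + margin_right
--         bounding_box.append((x, y - margin_top))
--     for ind, point in enumerate(reversed(baseline)):
--         x, y = point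
--         if ind == len(baseline) - 1:
--             x = x - margin_left
--         if ind == 0:
--             x = x + margin_right
--         bounding_box.append((x, y + margin_bot))
--
--     return bounding_box
-- ===== SOURCE B (Python) =====
-- def baseline_to_bbox(baseline, margin_top=12, margin_bot=10, margin_left=10, margin_right=10):
--     # Closed form: the k-th output vertex (0 <= k < 2n) is computed directly by index
--     # arithmetic, instead of staging two passes (forward and reversed) over the baseline.
--     n = len(baseline)
--     def point(i):
--         j, dy = (i, -margin_top) if i < n else (2 * n - 1 - i, margin_bot)
--         x, y = baseline[j]
--         dx = (-margin_left if j == 0 else 0) + (margin_right if j == n - 1 else 0)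
--         return (x + dx, y + dy)
--     return [point(i) for i in range(2 * n)]
-- ===== Notes on version B (the rewrite author's own statement) =====
-- stated objective: alternative
-- what changed: B computes the k-th output vertex directly by a closed-form index function over range(2n) (index arithmetic picks baseline[k] or baseline[2n-1-k] and adds the endpoint/edge offsets), instead of A's two staged passes over the baseline and its reversal.
import Mathlib
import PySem

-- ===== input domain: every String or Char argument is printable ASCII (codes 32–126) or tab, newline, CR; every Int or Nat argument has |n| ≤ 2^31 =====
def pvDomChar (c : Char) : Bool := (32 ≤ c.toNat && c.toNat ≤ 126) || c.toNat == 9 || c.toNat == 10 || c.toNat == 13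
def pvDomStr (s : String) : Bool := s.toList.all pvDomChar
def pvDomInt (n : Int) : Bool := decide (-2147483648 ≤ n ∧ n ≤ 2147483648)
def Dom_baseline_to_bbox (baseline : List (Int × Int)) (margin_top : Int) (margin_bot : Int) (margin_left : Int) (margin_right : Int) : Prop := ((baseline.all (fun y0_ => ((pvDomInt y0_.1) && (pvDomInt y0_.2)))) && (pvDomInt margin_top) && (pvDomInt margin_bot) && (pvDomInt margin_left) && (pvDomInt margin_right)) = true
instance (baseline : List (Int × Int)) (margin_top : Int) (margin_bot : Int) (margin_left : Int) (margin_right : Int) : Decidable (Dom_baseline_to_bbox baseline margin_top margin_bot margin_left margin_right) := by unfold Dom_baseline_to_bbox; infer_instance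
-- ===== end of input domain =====

-- B replaces A's two staged passes by a closed-form map over output indices 0..2n-1 (objective: alternative).


-- ===== PORT A =====
def baseline_to_bbox (baseline : List (Int × Int)) (margin_top : Int) (margin_bot : Int) (margin_left : Int) (margin_right : Int) : List (Int × Int) :=
  let n : Int := baseline.length
  let bb := (PySem.List.enumerate baseline).foldl (fun acc ip =>
      let x := ip.2.1
      let y := ip.2.2
      let x := if ip.1 = 0 then x - margin_left else x
      let x := if ip.1 = n - 1 then x + margin_right else x
      acc ++ [(x, y - margin_top)]) []
  (PySem.List.enumerate baseline.reverse).foldl (fun acc ip =>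
      let x := ip.2.1
      let y := ip.2.2
      let x := if ip.1 = n - 1 then x - margin_left else x
      let x := if ip.1 = 0 then x + margin_right else x
      acc ++ [(x, y + margin_bot)]) bb

-- ===== PORT B =====
-- mirrors Source B's inner 'def point(i)'
def bboxPoint (baseline : List (Int × Int)) (margin_top : Int) (margin_bot : Int) (margin_left : Int) (margin_right : Int) (n : Int) (i : Int) : Int × Int :=
  let jd := if i < n then (i, -margin_top) else (2 * n - 1 - i, margin_bot)
  let p := PySem.List.pyGetD baseline jd.1 (0, 0)
  let dx := (if jd.1 = 0 then -margin_left else 0) + (if jd.1 = n - 1 then margin_right else 0)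
  (p.1 + dx, p.2 + jd.2)

def baseline_to_bbox_alt (baseline : List (Int × Int)) (margin_top : Int) (margin_bot : Int) (margin_left : Int) (margin_right : Int) : List (Int × Int) :=
  let n : Int := baseline.length
  (PySem.List.pyRange 0 (2 * n) 1).map (bboxPoint baseline margin_top margin_bot margin_left margin_right n)

-- ===== PRECONDITION & SPEC =====
def Spec_baseline_to_bbox (baseline : List (Int × Int)) (margin_top : Int) (margin_bot : Int) (margin_left : Int) (margin_right : Int) (out : List (Int × Int)) : Prop := out = baseline_to_bbox_alt baseline margin_top margin_bot margin_left margin_right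
instance (baseline : List (Int × Int)) (margin_top : Int) (margin_bot : Int) (margin_left : Int) (margin_right : Int) (out : List (Int × Int)) : Decidable (Spec_baseline_to_bbox baseline margin_top margin_bot margin_left margin_right out) := by unfold Spec_baseline_to_bbox; infer_instance

-- ===== CLAIM =====
def Claim_equal_baseline_to_bbox : Prop := ∀ (baseline : List (Int × Int)) (margin_top : Int) (margin_bot : Int) (margin_left : Int) (margin_right : Int), Dom_baseline_to_bbox baseline margin_top margin_bot margin_left margin_right → Spec_baseline_to_bbox baseline margin_top margin_bot margin_left margin_right (baseline_to_bbox baseline margin_top margin_bot margin_left margin_right)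

-- ===== LEMMAS AND PROOFS =====
-- B's points at indices 0..n-1 are A's top edge.
theorem pv_top (bl : List (Int × Int)) (mt mb ml mr : Int) :
  List.map (fun x => ((if x.1 = (bl.length : Int) - 1 then (if x.1 = 0 then x.2.1 - ml else x.2.1) + mr
      else if x.1 = 0 then x.2.1 - ml else x.2.1), x.2.2 - mt)) (PySem.List.enumerate bl)
  = (PySem.List.pyRange 0 (bl.length : Int) 1).map (bboxPoint bl mt mb ml mr (bl.length : Int)) := by
  apply List.ext_getElem
  · simp [PySem.List.length_enumerate, PySem.List.length_pyRange_one]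
  · intro i h1 h2
    have hi : i < bl.length := by simpa [PySem.List.length_enumerate] using h1
    have hc : ((i : Int)) < (bl.length : Int) := by exact_mod_cast hi
    simp only [List.getElem_map, PySem.List.getElem_enumerate, PySem.List.getElem_pyRange_one,
      zero_add, bboxPoint, if_pos hc]
    rw [PySem.List.pyGetD_eq_getElem bl (0, 0) (Int.natCast_nonneg i) hc]
    simp only [Int.toNat_natCast, Prod.mk.injEq]
    split_ifs <;> constructor <;> ring

-- B's points at indices n..2n-1 are A's bottom edge (over the reversed baseline).
theorem pv_bot (bl : List (Int × Int)) (mt mb ml mr : Int) :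
  List.map (fun x => ((if x.1 = 0 then (if x.1 = (bl.length : Int) - 1 then x.2.1 - ml else x.2.1) + mr
      else if x.1 = (bl.length : Int) - 1 then x.2.1 - ml else x.2.1), x.2.2 + mb)) (PySem.List.enumerate bl.reverse)
  = (PySem.List.pyRange (bl.length : Int) (2 * (bl.length : Int)) 1).map (bboxPoint bl mt mb ml mr (bl.length : Int)) := by
  apply List.ext_getElem
  · simp [PySem.List.length_enumerate, PySem.List.length_pyRange_one]
    omega
  · intro i h1 h2
    have hi : i < bl.length := by
      simpa [PySem.List.length_enumerate] using h1
    have hc : ¬ ((bl.length : Int) + (i : Int)) < (bl.length : Int) := by omega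
    simp only [List.getElem_map, PySem.List.getElem_enumerate, PySem.List.getElem_pyRange_one,
      zero_add, List.getElem_reverse, bboxPoint, if_neg hc]
    have hj : (2 * (bl.length : Int) - 1 - ((bl.length : Int) + (i : Int)))
        = ((bl.length - 1 - i : Nat) : Int) := by omega
    rw [hj, PySem.List.pyGetD_eq_getElem bl (0, 0) (Int.natCast_nonneg _)
      (by exact_mod_cast (by omega : bl.length - 1 - i < bl.length))]
    simp only [Int.toNat_natCast, Prod.mk.injEq]
    refine ⟨?_, trivial⟩
    split_ifs <;> omega

-- ===== VERDICT =====
theorem baseline_to_bbox_spec : Claim_equal_baseline_to_bbox := by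
  intro bl mt mb ml mr _
  unfold Spec_baseline_to_bbox
  simp only [baseline_to_bbox, baseline_to_bbox_alt,
    PySem.List.foldl_append_singleton_eq_map, List.nil_append]
  rw [PySem.List.pyRange_one_append 0 (bl.length : Int) (2 * (bl.length : Int))
    (Int.natCast_nonneg _) (by omega), List.map_append, ← pv_top, ← pv_bot]
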